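-- pv_equiv track=rewrite | github.com/isLouisHsu/Basic-Machine-Learning-Algorithm | introduction_to_algorithm/priorityQueue.py | _max_priority_queue
-- ===== SOURCE A (Python) =====
-- def _max_priority_queue(A, i):
--     """
--     Params:
--         A: {list}
--         i: {int} index of current number
--     """
--     while i > 0:
--         p = (i - 1) // 2    # 父节点索引
--         if A[i] <= A[p]:
--             break
--
--         A[i], A[p] = A[p], A[i]
--         i = p
--     return A
-- ===== SOURCE B (Python) =====
-- def _max_priority_queue(A, i):
--     """Staged sift-up: (1) precompute the ancestor index chain from i to the
--     root, (2) count with a take-while how many ancestors the value climbs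
--     past, (3) bulk-rotate those ancestors down one slot and place the value
--     once."""
--     if i <= 0:
--         return A
--     # stage 1: ancestor index chain i, parent(i), ..., 0
--     path = [i]
--     while path[-1] > 0:
--         path.append((path[-1] - 1) // 2)
--     val = A[i]
--     # stage 2: how many consecutive ancestors are strictly smaller than val
--     k = 0
--     while k + 1 < len(path) and A[path[k + 1]] < val:
--         k += 1
--     # stage 3: rotate the chain prefix down one step, place val at the top
--     for t in range(k):
--         A[path[t]] = A[path[t + 1]]
--     A[path[k]] = val
--     return A
-- ===== Notes on version B (the rewrite author's own statement) =====
-- stated objective: alternative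
-- what changed: B replaces A's interleaved compare-and-swap loop by three staged passes: precompute the ancestor index chain, take-while count how many ancestors the value climbs past, then bulk-rotate that prefix down and write the value once.
import Mathlib
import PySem

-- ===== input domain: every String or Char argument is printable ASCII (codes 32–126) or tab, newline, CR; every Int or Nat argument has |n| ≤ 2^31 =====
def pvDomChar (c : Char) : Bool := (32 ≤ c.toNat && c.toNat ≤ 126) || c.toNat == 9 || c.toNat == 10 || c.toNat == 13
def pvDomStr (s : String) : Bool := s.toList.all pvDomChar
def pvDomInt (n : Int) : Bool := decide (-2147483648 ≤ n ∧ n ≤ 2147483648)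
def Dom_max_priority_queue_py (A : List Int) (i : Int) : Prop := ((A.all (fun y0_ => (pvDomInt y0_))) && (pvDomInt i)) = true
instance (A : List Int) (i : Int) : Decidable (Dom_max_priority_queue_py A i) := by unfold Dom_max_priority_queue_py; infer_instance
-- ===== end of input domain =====

-- B replaces A's interleaved compare-and-swap sift-up by three staged passes
-- (ancestor chain, take-while climb count, bulk rotate + single placement).
-- Both Pythons mutate the list in place identically and return it; the
-- equivalence proved here is about the returned value.

-- ===== PORT A =====
-- A's while-loop: swap with the parent while strictly greater, walking up.
-- Indices read are in range inside Pre_; getD's default is never used there.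
def pvALoop (A : List Int) (i : Nat) : List Int :=
  if _h : 0 < i then
    let p := (i - 1) / 2
    if A.getD i 0 ≤ A.getD p 0 then A
    else pvALoop ((A.set i (A.getD p 0)).set p (A.getD i 0)) p
  else A
termination_by i
decreasing_by exact Nat.div_lt_of_lt_mul (by omega)

def max_priority_queue_py (A : List Int) (i : Int) : List Int :=
  pvALoop A i.toNat

-- ===== PORT B =====
-- Stage 1 of Source B: the ancestor index chain [i, parent i, ..., 0].
def pvPath (i : Nat) : List Nat :=
  if _h : 0 < i then i :: pvPath ((i - 1) / 2) else [i]
termination_by i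
decreasing_by exact Nat.div_lt_of_lt_mul (by omega)

-- Stage 2 of Source B: take-while count of ancestors strictly below val.
def pvCount (A : List Int) (rest : List Nat) (val : Int) : Nat :=
  match rest with
  | [] => 0
  | p :: rs => if A.getD p 0 < val then pvCount A rs val + 1 else 0

-- Stage 3 of Source B: for t in range(k): A[path[t]] = A[path[t+1]].
def pvShift (A : List Int) (path : List Nat) (k : Nat) : List Int :=
  (List.range k).foldl
    (fun B t => B.set (path.getD t 0) (B.getD (path.getD (t + 1) 0) 0)) A

def max_priority_queue_py_alt (A : List Int) (i : Int) : List Int :=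
  if i ≤ 0 then A
  else
    let path := pvPath i.toNat
    let val := A.getD i.toNat 0
    let k := pvCount A path.tail val
    (pvShift A path k).set (path.getD k 0) val

-- ===== PRECONDITION & SPEC =====
-- Pre_ excludes exactly the inputs where the Python A raises IndexError
-- (i > 0 with i out of range); B raises there as well.
def Pre_max_priority_queue_py (A : List Int) (i : Int) : Prop := i ≤ 0 ∨ i < A.length
instance (A : List Int) (i : Int) : Decidable (Pre_max_priority_queue_py A i) := by unfold Pre_max_priority_queue_py; infer_instance

def pvWitness_max_priority_queue_py : List Int × Int := ([3, 1, 2, 5], 3)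

def Spec_max_priority_queue_py (A : List Int) (i : Int) (out : List Int) : Prop := out = max_priority_queue_py_alt A i
instance (A : List Int) (i : Int) (out : List Int) : Decidable (Spec_max_priority_queue_py A i out) := by unfold Spec_max_priority_queue_py; infer_instance

-- ===== CLAIM (what is proved, stated in full; the proofs are below) =====
def Claim_equal_max_priority_queue_py : Prop := ∀ (A : List Int) (i : Int), Dom_max_priority_queue_py A i → Pre_max_priority_queue_py A i → Spec_max_priority_queue_py A i (max_priority_queue_py A i)

-- ===== LEMMAS AND PROOFS =====

-- Proof-side bridge: the fused shift loop (hole-style sift-up).  Both A's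
-- swap loop and B's staged passes are proved equal to it.
def pvBLoop (A : List Int) (i : Nat) (val : Int) : List Int :=
  if _h : 0 < i then
    let p := (i - 1) / 2
    if A.getD p 0 < val then pvBLoop (A.set i (A.getD p 0)) p val
    else A.set i val
  else A.set i val
termination_by i
decreasing_by exact Nat.div_lt_of_lt_mul (by omega)

-- Rewriting the slot the loop currently points at does not change pvBLoop's
-- result: the first thing the loop does with slot i is overwrite it.
theorem pvBLoop_set (L : List Int) (i : Nat) (x val : Int) :
    pvBLoop (L.set i x) i val = pvBLoop L i val := by
  rw [pvBLoop, pvBLoop]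
  by_cases h : 0 < i
  · have hp : (i - 1) / 2 ≠ i := Nat.ne_of_lt (Nat.div_lt_of_lt_mul (by omega))
    simp [h, List.getD, List.getElem?_set_ne (Ne.symm hp), List.set_set]
  · simp [h, List.set_set]

-- Writing back the element already at an in-range position is the identity.
theorem set_getD_self (L : List Int) (i : Nat) (h : i < L.length) :
    L.set i (L.getD i 0) = L := by
  simp [List.getD, List.getElem?_eq_getElem h]

-- A's swap loop equals the bridge loop when i is in range.
theorem pvALoop_eq_pvBLoop (i : Nat) (A : List Int) (h : i < A.length) :
    pvALoop A i = pvBLoop A i (A.getD i 0) := by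
  induction i using Nat.strong_induction_on generalizing A with
  | _ i ih =>
    rw [pvALoop, pvBLoop]
    by_cases hi : 0 < i
    · have hplt : (i - 1) / 2 < i := Nat.div_lt_of_lt_mul (by omega)
      have hp : (i - 1) / 2 < A.length := lt_trans hplt h
      simp only [hi, dif_pos]
      by_cases hle : A.getD i 0 ≤ A.getD ((i - 1) / 2) 0
      · rw [if_pos hle, if_neg (not_lt.mpr hle), set_getD_self A i h]
      · rw [if_neg hle, if_pos (lt_of_not_ge hle)]
        have hlen : (i - 1) / 2 < ((A.set i (A.getD ((i - 1) / 2) 0)).set ((i - 1) / 2) (A.getD i 0)).length := by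
          simpa using hp
        rw [ih _ hplt _ hlen]
        have hg : ((A.set i (A.getD ((i - 1) / 2) 0)).set ((i - 1) / 2) (A.getD i 0)).getD ((i - 1) / 2) 0
            = A.getD i 0 := by
          simp [List.getD, hp]
        rw [hg, pvBLoop_set]
    · have hi0 : i = 0 := by omega
      subst hi0
      simp only [hi, dif_neg, not_false_iff]
      rw [set_getD_self A 0 h]

-- Every index on the ancestor chain of j is at most j.
theorem pvPath_le (j : Nat) : ∀ x ∈ pvPath j, x ≤ j := by
  induction j using Nat.strong_induction_on with
  | _ j ih =>
    intro x hx
    rw [pvPath] at hx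
    by_cases hj : 0 < j
    · simp only [hj, dif_pos, List.mem_cons] at hx
      have hplt : (j - 1) / 2 < j := Nat.div_lt_of_lt_mul (by omega)
      rcases hx with rfl | hx
      · exact le_refl _
      · exact le_trans (ih _ hplt x hx) (le_of_lt hplt)
    · simp only [hj, dif_neg, not_false_iff, List.mem_singleton] at hx
      omega

-- The climb count reads only chain slots, so a write elsewhere preserves it.
theorem pvCount_set (A : List Int) (rest : List Nat) (i : Nat) (v val : Int)
    (h : ∀ x ∈ rest, x ≠ i) :
    pvCount (A.set i v) rest val = pvCount A rest val := by
  induction rest with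
  | nil => rfl
  | cons p rs ihr =>
    have hp : p ≠ i := h p (List.mem_cons_self ..)
    have hg : (A.set i v).getD p 0 = A.getD p 0 := by
      simp [List.getD, List.getElem?_set_ne (Ne.symm hp)]
    simp only [pvCount, hg]
    rw [ihr (fun x hx => h x (List.mem_cons_of_mem _ hx))]

-- B's staged passes fuse into the bridge loop (unconditionally).
theorem staged_eq_pvBLoop (i : Nat) (A : List Int) (val : Int) :
    (pvShift A (pvPath i) (pvCount A (pvPath i).tail val)).set
      ((pvPath i).getD (pvCount A (pvPath i).tail val) 0) val
    = pvBLoop A i val := by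
  induction i using Nat.strong_induction_on generalizing A with
  | _ i ih =>
    rw [pvPath, pvBLoop]
    by_cases hi : 0 < i
    · have hplt : (i - 1) / 2 < i := Nat.div_lt_of_lt_mul (by omega)
      simp only [hi, dif_pos, List.tail_cons]
      set p := (i - 1) / 2 with hpdef
      have hpath : pvPath p = p :: (pvPath p).tail := by
        rw [pvPath]; by_cases h0 : 0 < p <;> simp [h0]
      by_cases hlt : A.getD p 0 < val
      · rw [if_pos hlt]
        -- count on A: head p passes the take-while
        have hcount : pvCount A (pvPath p) val = pvCount A (pvPath p).tail val + 1 := by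
          conv_lhs => rw [hpath]
          simp only [pvCount]
          rw [if_pos hlt]
        -- rotating one extra step from the head = one parent-shift then rotate the rest
        have hne : ∀ x ∈ (pvPath p).tail, x ≠ i := by
          intro x hx
          have : x ≤ p := pvPath_le p x (List.mem_of_mem_tail hx)
          omega
        have hcount' : pvCount (A.set i (A.getD p 0)) (pvPath p).tail val
            = pvCount A (pvPath p).tail val := pvCount_set _ _ _ _ _ hne
        set k := pvCount A (pvPath p).tail val with hk
        have hshift : pvShift A (i :: pvPath p) (k + 1)
            = pvShift (A.set i (A.getD p 0)) (pvPath p) k := by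
          unfold pvShift
          rw [List.range_succ_eq_map, List.foldl_cons, List.foldl_map]
          have h0 : (i :: pvPath p).getD 0 0 = i := rfl
          have h1 : (i :: pvPath p).getD 1 0 = p := by
            conv_lhs => rw [hpath]
            rfl
          rw [h0, h1]
          apply PySem.List.foldl_congr_mem
          intro B t _
          simp
        have hgetD : (i :: pvPath p).getD (k + 1) 0 = (pvPath p).getD k 0 := by
          simp
        rw [hcount, hshift, hgetD, ← hcount', ih p hplt]
      · rw [if_neg hlt]
        have hcount : pvCount A (pvPath p) val = 0 := by
          conv_lhs => rw [hpath]
          simp only [pvCount]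
          rw [if_neg hlt]
        rw [hcount]
        simp [pvShift]
    · simp only [hi, dif_neg, not_false_iff]
      simp [pvCount, pvShift]

-- ===== VERDICT (by name: the statement is the Claim_ definition above) =====
theorem max_priority_queue_py_spec : Claim_equal_max_priority_queue_py := by
  intro A i _hdom hpre
  unfold Spec_max_priority_queue_py max_priority_queue_py max_priority_queue_py_alt
  by_cases hi : i ≤ 0
  · simp [hi, Int.toNat_of_nonpos hi, pvALoop]
  · have hlen : i.toNat < A.length := by
      rcases hpre with h | h
      · omega
      · omega
    simp only [hi, if_neg, not_false_iff]
    rw [pvALoop_eq_pvBLoop i.toNat A hlen, ← staged_eq_pvBLoop]
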